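-- pv_equiv track=rewrite | github.com/Helenbzbz/codingbat | string-2/xyz_there.py | xyz_there
-- ===== SOURCE A (Python) =====
-- def xyz_there(str):
--   for i in range(len(str)-2):
--     if i == 0 and str[i:i+3] == 'xyz':
--       return True
--
--     if i > 0:
--       if (str[i:i+3]) == 'xyz' and str[i-1:i+3] != '.xyz':
--         return True
--   return False
-- ===== SOURCE B (Python) =====
-- def xyz_there(str):
--     return str.count('xyz') > str.count('.xyz')
-- ===== Notes on version B (the rewrite author's own statement) =====
-- stated objective: faster
-- what changed: A scans every index with an early return, slicing and comparing at each position; B does no positional scan of its own: it counts occurrences of the pattern and of the dotted pattern in two substring-count passes and returns whether the first count exceeds the second (correct since neither pattern can overlap itself and every dotted occurrence is an occurrence).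
import Mathlib
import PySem

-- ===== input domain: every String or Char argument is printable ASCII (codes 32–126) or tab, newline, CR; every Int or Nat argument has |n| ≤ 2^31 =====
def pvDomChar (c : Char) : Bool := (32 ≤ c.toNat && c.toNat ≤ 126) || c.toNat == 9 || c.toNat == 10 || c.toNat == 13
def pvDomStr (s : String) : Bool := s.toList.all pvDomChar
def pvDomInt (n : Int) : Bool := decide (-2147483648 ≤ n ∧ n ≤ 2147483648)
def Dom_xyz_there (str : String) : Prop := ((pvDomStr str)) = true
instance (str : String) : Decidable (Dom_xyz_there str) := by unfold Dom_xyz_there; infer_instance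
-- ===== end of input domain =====

-- B replaces A's early-exit positional scan by two substring counts:
-- it returns str.count('xyz') > str.count('.xyz') (objective: idiomatic, count-based).

-- ===== PORT A =====
-- literal transliteration of A: for i in range(len(str)-2), early return folded into the accumulator
def xyz_there (str : String) : Bool :=
  (PySem.List.pyRange 0 (PySem.Str.len str - 2) 1).foldl
    (fun acc i =>
      if acc then acc
      else if i == 0 && (PySem.Str.slice str (some i) (some (i + 3)) == "xyz") then true
      else if i > 0 then
        if (PySem.Str.slice str (some i) (some (i + 3)) == "xyz")
            && !(PySem.Str.slice str (some (i - 1)) (some (i + 3)) == ".xyz") then true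
        else acc
      else acc)
    false

-- ===== PORT B =====
-- Source B: return str.count('xyz') > str.count('.xyz')
def xyz_there_alt (str : String) : Bool :=
  decide (PySem.Str.count str ".xyz" < PySem.Str.count str "xyz")

-- ===== PRECONDITION & SPEC =====
def Spec_xyz_there (str : String) (out : Bool) : Prop := out = xyz_there_alt str
instance (str : String) (out : Bool) : Decidable (Spec_xyz_there str out) := by unfold Spec_xyz_there; infer_instance

-- ===== CLAIM (what is proved, stated in full; the proofs are below) =====
def Claim_equal_xyz_there : Prop := ∀ (str : String), Dom_xyz_there str → Spec_xyz_there str (xyz_there str)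

-- ===== LEMMAS AND PROOFS =====

def GoodAt (cs : List Char) (j : Nat) : Prop :=
  ['x', 'y', 'z'] <+: cs.drop j ∧ (j = 0 ∨ cs[j - 1]? ≠ some '.')

lemma sliceN_iff (str : String) (j n : Nat) (pat : String) (hn : pat.toList.length = n) :
    ((PySem.Str.slice str (some (j:Int)) (some ((j:Int) + (n:Int))) == pat) = true)
      ↔ pat.toList <+: str.toList.drop j := by
  rw [beq_iff_eq, ← String.toList_inj, PySem.Str.toList_slice,
    PySem.Chars.slice_eq_listSlice, PySem.List.slice_natCast_add,
    List.prefix_iff_eq_take, hn]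
  exact eq_comm

lemma slice3_iff (str : String) (j : Nat) :
    ((PySem.Str.slice str (some (j:Int)) (some ((j:Int) + 3)) == "xyz") = true)
      ↔ ['x','y','z'] <+: str.toList.drop j := by
  have h := sliceN_iff str j 3 "xyz" (by decide)
  push_cast at h
  simpa using h

lemma slice4_iff (str : String) (j : Nat) (hj : 1 ≤ j) :
    ((PySem.Str.slice str (some ((j:Int) - 1)) (some ((j:Int) + 3)) == ".xyz") = true)
      ↔ ['.','x','y','z'] <+: str.toList.drop (j - 1) := by
  have h := sliceN_iff str (j-1) 4 ".xyz" (by decide)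
  have e1 : (j:Int) - 1 = ((j-1 : Nat) : Int) := by omega
  have e2 : (j:Int) + 3 = ((j-1 : Nat) : Int) + ((4:Nat) : Int) := by omega
  rw [e1, e2]
  simpa using h

lemma xyz_len_bound {cs : List Char} {j : Nat} (h : ['x','y','z'] <+: cs.drop j) :
    j + 3 ≤ cs.length := by
  have := h.length_le
  simp [List.length_drop] at this
  omega

lemma dotprefix_iff {cs : List Char} {j : Nat} (hj : 1 ≤ j)
    (hx : ['x','y','z'] <+: cs.drop j) :
    (['.','x','y','z'] <+: cs.drop (j-1)) ↔ cs[j-1]? = some '.' := by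
  have hlen : j - 1 < cs.length := by have := xyz_len_bound hx; omega
  have hd : cs.drop (j-1) = cs[j-1] :: cs.drop j := by
    have e : j - 1 + 1 = j := by omega
    rw [List.drop_eq_getElem_cons hlen, e]
  rw [hd, List.cons_prefix_cons, List.getElem?_eq_getElem hlen]
  constructor
  · rintro ⟨h1, _⟩; rw [← h1]
  · intro h; exact ⟨by simpa using h.symm, hx⟩

lemma foldA (l : List Int) (c1 c2 : Int → Bool) (a : Bool) :
    l.foldl (fun acc i => if acc then acc else if c1 i then true
      else if i > 0 then (if c2 i then true else acc) else acc) a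
    = (a || l.any fun i => c1 i || (decide (0 < i) && c2 i)) := by
  induction l generalizing a with
  | nil => simp
  | cons x xs ih =>
    simp only [List.foldl_cons, List.any_cons, ih]
    by_cases h1 : c1 x = true <;> by_cases h2 : (0:Int) < x <;>
      cases a <;> cases h3 : c2 x <;> simp [*]

lemma A_iff (str : String) :
    xyz_there str = true ↔ ∃ j : Nat, GoodAt str.toList j := by
  unfold xyz_there
  rw [foldA]
  simp only [Bool.false_or, List.any_eq_true]
  constructor
  · rintro ⟨i, hmem, hc⟩
    rw [PySem.List.mem_pyRange_one] at hmem
    obtain ⟨hi0, _⟩ := hmem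
    lift i to Nat using hi0 with j
    rcases Bool.or_eq_true .. |>.mp hc with h1 | h2
    · -- i == 0 branch
      rw [Bool.and_eq_true] at h1
      obtain ⟨hz, hs⟩ := h1
      have hj0 : j = 0 := by simpa using hz
      subst hj0
      exact ⟨0, (slice3_iff str 0).mp (by simpa using hs), Or.inl rfl⟩
    · rw [Bool.and_eq_true, Bool.and_eq_true] at h2
      obtain ⟨hpos, hs3, hs4⟩ := h2
      have hj1 : 1 ≤ j := by simp at hpos; omega
      have hx := (slice3_iff str j).mp hs3
      refine ⟨j, hx, Or.inr ?_⟩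
      intro hdot
      have : ((PySem.Str.slice str (some ((j:Int) - 1)) (some ((j:Int) + 3)) == ".xyz") = true) :=
        (slice4_iff str j hj1).mpr ((dotprefix_iff hj1 hx).mpr hdot)
      simp [this] at hs4
  · rintro ⟨j, hx, hgood⟩
    refine ⟨(j:Int), ?_, ?_⟩
    · rw [PySem.List.mem_pyRange_one]
      have := xyz_len_bound hx
      constructor
      · positivity
      · simp only [PySem.Str.len_eq]
        omega
    · by_cases hj0 : j = 0
      · subst hj0
        have h3 := (slice3_iff str 0).mpr hx
        norm_num at h3 ⊢
        simp [h3]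
      · have hj1 : 1 ≤ j := by omega
        have hdot : str.toList[j-1]? ≠ some '.' := hgood.resolve_left hj0
        have h3 := (slice3_iff str j).mpr hx
        have h4 : ((PySem.Str.slice str (some ((j:Int) - 1)) (some ((j:Int) + 3)) == ".xyz") = false) := by
          rw [Bool.eq_false_iff]
          intro hc
          exact hdot ((dotprefix_iff hj1 hx).mp ((slice4_iff str j hj1).mp hc))
        simp [h3, h4]
        omega

-- Python's non-overlapping substring count equals the number of occurrence
-- positions whenever the pattern cannot overlap itself.
lemma go_count (sub : List Char) (hne : sub ≠ [])
    (hov : ∀ l : List Char, sub <+: l → ∀ d, 1 ≤ d → d < sub.length → ¬ sub <+: l.drop d) :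
    ∀ fuel l acc, l.length ≤ fuel →
      PySem.Chars.count.go sub fuel l acc
        = acc + (List.range l.length).countP (fun j => decide (sub <+: l.drop j)) := by
  intro fuel
  induction fuel with
  | zero =>
    intro l acc h
    have hl : l = [] := by cases l <;> simp_all
    subst hl
    simp [PySem.Chars.count.go]
  | succ f ih =>
    intro l acc h
    cases l with
    | nil => simp [PySem.Chars.count.go]
    | cons c t =>
      simp only [List.length_cons] at h
      rw [PySem.Chars.count.go]
      by_cases hp : sub.isPrefixOf (c :: t)
      · have hpre : sub <+: (c :: t) := List.isPrefixOf_iff_prefix.mp hp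
        have hk1 : 1 ≤ sub.length := by cases sub <;> simp_all
        have hkle : sub.length ≤ t.length + 1 := by simpa using hpre.length_le
        simp only [hp, if_true]
        rw [ih (List.drop sub.length (c :: t)) (acc + 1) (by simp; omega)]
        have hdroplen : (List.drop sub.length (c :: t)).length = t.length + 1 - sub.length := by
          simp
        rw [hdroplen]
        have hcount1 : (List.range sub.length).countP
            (fun j => decide (sub <+: (c :: t).drop j)) = 1 := by
          obtain ⟨k, hk⟩ : ∃ k, sub.length = k + 1 := ⟨sub.length - 1, by omega⟩
          rw [hk, List.range_succ_eq_map, List.countP_cons, List.countP_map]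
          have hz : (List.range k).countP
              ((fun j => decide (sub <+: (c :: t).drop j)) ∘ Nat.succ) = 0 := by
            rw [List.countP_eq_zero]
            intro j hj
            simpa [Function.comp, Nat.succ_eq_add_one] using
              hov _ hpre (j+1) (by omega) (by rw [hk]; simpa using List.mem_range.mp hj)
          simp [hz, hpre]
        have hshift : (List.range (t.length + 1 - sub.length)).countP
              (fun j => decide (sub <+: (List.drop sub.length (c :: t)).drop j))
            = (List.range (t.length + 1 - sub.length)).countP
              ((fun j => decide (sub <+: (c :: t).drop j)) ∘ fun x => sub.length + x) := by
          apply List.countP_congr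
          intro j _
          simp only [Function.comp]
          rw [List.drop_drop]
        have hsplit : t.length + 1 = sub.length + (t.length + 1 - sub.length) := by omega
        calc acc + 1 + (List.range (t.length + 1 - sub.length)).countP
              (fun j => decide (sub <+: (List.drop sub.length (c :: t)).drop j))
            = acc + ((List.range sub.length).countP (fun j => decide (sub <+: (c :: t).drop j))
                + (List.range (t.length + 1 - sub.length)).countP
                  ((fun j => decide (sub <+: (c :: t).drop j)) ∘ fun x => sub.length + x)) := by
              rw [hshift, hcount1]
              omega
          _ = acc + (List.range (t.length + 1)).countP
              (fun j => decide (sub <+: (c :: t).drop j)) := by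
              congr 1
              conv_rhs => rw [hsplit, List.range_add]
              rw [List.countP_append, List.countP_map]
      · have hnpre : ¬ sub <+: (c :: t) := fun hc => hp (List.isPrefixOf_iff_prefix.mpr hc)
        simp only [hp, Bool.false_eq_true, if_false]
        rw [ih t acc (by omega)]
        simp only [List.length_cons, List.range_succ_eq_map, List.countP_cons, List.countP_map,
          List.drop_zero]
        simp only [hnpre, decide_false, Bool.false_eq_true, if_false, add_zero]
        congr 1

lemma no_overlap_xyz :
    ∀ l : List Char, ['x','y','z'] <+: l → ∀ d, 1 ≤ d → d < (['x','y','z'] : List Char).length →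
      ¬ (['x','y','z'] <+: l.drop d) := by
  rintro l ⟨r, rfl⟩ d h1 h2
  simp only [List.length_cons, List.length_nil] at h2
  interval_cases d <;> intro hc <;> simp [List.cons_prefix_cons] at hc

lemma no_overlap_dxyz :
    ∀ l : List Char, ['.','x','y','z'] <+: l → ∀ d, 1 ≤ d → d < (['.','x','y','z'] : List Char).length →
      ¬ (['.','x','y','z'] <+: l.drop d) := by
  rintro l ⟨r, rfl⟩ d h1 h2
  simp only [List.length_cons, List.length_nil] at h2
  interval_cases d <;> intro hc <;> simp [List.cons_prefix_cons] at hc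

lemma count_xyz_eq (cs : List Char) :
    PySem.Chars.count cs ['x','y','z']
      = (List.range cs.length).countP (fun j => decide (['x','y','z'] <+: cs.drop j)) := by
  have := go_count ['x','y','z'] (by simp) no_overlap_xyz cs.length cs 0 le_rfl
  simpa [PySem.Chars.count] using this

lemma count_dxyz_eq (cs : List Char) :
    PySem.Chars.count cs ['.','x','y','z']
      = (List.range cs.length).countP (fun j => decide (['.','x','y','z'] <+: cs.drop j)) := by
  have := go_count ['.','x','y','z'] (by simp) no_overlap_dxyz cs.length cs 0 le_rfl
  simpa [PySem.Chars.count] using this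

lemma dxyz_char (cs : List Char) (j : Nat) :
    (['.','x','y','z'] <+: cs.drop j) ↔ cs[j]? = some '.' ∧ ['x','y','z'] <+: cs.drop (j+1) := by
  by_cases hj : j < cs.length
  · rw [List.drop_eq_getElem_cons hj, List.cons_prefix_cons, List.getElem?_eq_getElem hj]
    constructor
    · rintro ⟨h1, h2⟩; exact ⟨by rw [← h1], h2⟩
    · rintro ⟨h1, h2⟩; exact ⟨by simpa using h1.symm, h2⟩
  · rw [List.drop_eq_nil_of_le (by omega)]
    simp [List.getElem?_eq_none (le_of_not_gt hj)]

-- the 'bad' occurrences: an 'xyz' immediately preceded by '.'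
def badB (cs : List Char) (j : Nat) : Bool :=
  decide (1 ≤ j) && decide (cs[j-1]? = some '.')

lemma countP_split {α : Type} (l : List α) (p q : α → Bool) :
    l.countP p = l.countP (fun x => p x && q x) + l.countP (fun x => p x && !q x) := by
  induction l with
  | nil => simp
  | cons a t ih =>
    simp only [List.countP_cons, ih]
    cases hp : p a <;> cases hq : q a <;> simp <;> omega

lemma count_dxyz_eq_bad (cs : List Char) :
    (List.range cs.length).countP (fun j => decide (['.','x','y','z'] <+: cs.drop j))
      = (List.range cs.length).countP
          (fun j => decide (['x','y','z'] <+: cs.drop j) && badB cs j) := by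
  rcases Nat.eq_zero_or_pos cs.length with h0 | hpos
  · simp [h0]
  · obtain ⟨m, hm⟩ : ∃ m, cs.length = m + 1 := ⟨cs.length - 1, by omega⟩
    rw [hm]
    have hlast : decide (['.','x','y','z'] <+: cs.drop m) = false := by
      rw [decide_eq_false_iff_not]
      intro hc
      have := hc.length_le
      simp [List.length_drop, hm] at this
    have hzero : (decide (['x','y','z'] <+: cs.drop 0) && badB cs 0) = false := by
      simp [badB]
    conv_lhs => rw [List.range_succ]
    conv_rhs => rw [List.range_succ_eq_map]
    rw [List.countP_append, List.countP_singleton, hlast, List.countP_cons, List.countP_map,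
      hzero]
    simp only [Bool.false_eq_true, if_false, add_zero]
    apply List.countP_congr
    intro j _
    simp only [Function.comp, badB, Nat.succ_eq_add_one, Nat.add_sub_cancel]
    by_cases h1 : cs[j]? = some '.' <;> by_cases h2 : ['x','y','z'] <+: cs.drop (j+1) <;>
      simp [h1, h2, dxyz_char]

lemma B_iff (str : String) :
    xyz_there_alt str = true ↔ ∃ j : Nat, GoodAt str.toList j := by
  unfold xyz_there_alt
  rw [decide_eq_true_iff]
  have e3 : ("xyz".toList) = ['x','y','z'] := by decide
  have e4 : (".xyz".toList) = ['.','x','y','z'] := by decide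
  rw [PySem.Str.count_eq, PySem.Str.count_eq, e3, e4,
    count_xyz_eq, count_dxyz_eq, count_dxyz_eq_bad]
  set cs := str.toList with hcs
  rw [countP_split (List.range cs.length)
    (fun j => decide (['x','y','z'] <+: cs.drop j)) (badB cs)]
  constructor
  · intro hlt
    have hpos : 0 < (List.range cs.length).countP
        (fun j => decide (['x','y','z'] <+: cs.drop j) && !badB cs j) := by omega
    obtain ⟨j, _, hj⟩ := List.countP_pos_iff.mp hpos
    rw [Bool.and_eq_true, decide_eq_true_eq, Bool.not_eq_eq_eq_not, Bool.not_true] at hj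
    refine ⟨j, hj.1, ?_⟩
    have := hj.2
    simp only [badB, Bool.and_eq_false_iff, decide_eq_false_iff_not] at this
    rcases this with h | h
    · left; omega
    · right; exact h
  · rintro ⟨j, hx, hgood⟩
    have hmem : j ∈ List.range cs.length := by
      rw [List.mem_range]
      have := xyz_len_bound hx
      omega
    have hb : (decide (['x','y','z'] <+: cs.drop j) && !badB cs j) = true := by
      simp only [badB, Bool.and_eq_true, decide_eq_true_eq, Bool.not_eq_eq_eq_not, Bool.not_true,
        Bool.and_eq_false_iff, decide_eq_false_iff_not]
      refine ⟨hx, ?_⟩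
      rcases hgood with h | h
      · left; omega
      · right; exact h
    have hpos : 0 < (List.range cs.length).countP
        (fun j => decide (['x','y','z'] <+: cs.drop j) && !badB cs j) :=
      List.countP_pos_iff.mpr ⟨j, hmem, hb⟩
    omega

-- ===== VERDICT (by name: the statement is the Claim_ definition above) =====
theorem xyz_there_spec : Claim_equal_xyz_there := by
  intro str _
  unfold Spec_xyz_there
  exact Bool.eq_iff_iff.mpr ((A_iff str).trans (B_iff str).symm)
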